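-- pv_equiv track=rewrite | github.com/abUmat/abUmalib | graph/chromatic_number.py | _calc
-- ===== SOURCE A (Python) =====
-- def _calc(n: int, _hist, mod: int) -> int:
--     hist = _hist[::]
--     for c in range(1, n + 1):
--         sm = 0
--         for i, (j, x) in enumerate(hist):
--             x = x * j % mod
--             sm += x
--             hist[i] = j, x
--         if sm % mod: return c
--     return n
-- ===== SOURCE B (Python) =====
-- def _calc(n: int, _hist, mod: int) -> int:
--     # collapse duplicate bases first (the tested sum is linear in the weights),
--     # then per c compute each term statelessly with modular exponentiation
--     weight = {}
--     for j, x in _hist: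
--         weight[j] = weight.get(j, 0) + x
--     for c in range(1, n + 1):
--         sm = 0
--         for j, w in weight.items():
--             sm += w * pow(j, c, mod) % mod
--         if sm % mod:
--             return c
--     return n
-- ===== Notes on version B (the rewrite author's own statement) =====
-- stated objective: alternative
-- what changed: B first aggregates duplicate bases into a dict of weights (one pass, valid because the tested sum is linear in the weights mod `mod`), then computes each term of the per-c sum statelessly as w * pow(j, c, mod) % mod over the dict items, replacing A's copied histogram threaded through mutated running products.
import Mathlib
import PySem

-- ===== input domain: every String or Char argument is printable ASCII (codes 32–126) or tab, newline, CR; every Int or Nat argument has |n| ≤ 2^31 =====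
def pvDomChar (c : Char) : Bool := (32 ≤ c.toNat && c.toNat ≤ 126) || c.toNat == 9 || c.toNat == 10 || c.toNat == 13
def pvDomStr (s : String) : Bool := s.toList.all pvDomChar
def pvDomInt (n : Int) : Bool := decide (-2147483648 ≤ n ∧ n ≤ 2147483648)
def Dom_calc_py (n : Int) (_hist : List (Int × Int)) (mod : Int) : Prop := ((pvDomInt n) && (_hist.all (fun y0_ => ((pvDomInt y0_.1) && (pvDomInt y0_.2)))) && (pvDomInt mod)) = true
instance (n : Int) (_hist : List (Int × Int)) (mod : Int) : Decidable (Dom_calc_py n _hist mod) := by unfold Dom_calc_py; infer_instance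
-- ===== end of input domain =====

-- B first collapses duplicate bases into a dict of weights (the tested sum is linear in the
-- weights mod `mod`), then computes each term statelessly by modular exponentiation — no
-- copied histogram, no threaded running products (alternative decomposition).

-- ===== PORT A =====
-- inner pass 'for i, (j, x) in enumerate(hist): x = x*j % mod; sm += x; hist[i] = j, x'
-- as a left fold rebuilding hist (each index written exactly once) and accumulating sm
def calcAStep (m : Int) (hist : List (Int × Int)) : List (Int × Int) × Int :=
  hist.foldl (fun acc p =>
      let x := PySem.Int.mod (p.2 * p.1) m
      (acc.1 ++ [(p.1, x)], acc.2 + x))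
    ([], 0)

-- outer loop 'for c in range(1, n+1)', fuel = number of remaining iterations
def calcALoop (n m : Int) (hist : List (Int × Int)) (c : Int) : Nat → Int
  | 0 => n
  | Nat.succ f =>
    let r := calcAStep m hist
    if PySem.Int.mod r.2 m ≠ 0 then c else calcALoop n m r.1 (c + 1) f

def calc_py (n : Int) (_hist : List (Int × Int)) (mod : Int) : Int :=
  -- 'hist = _hist[::]' is a copy; over immutable Lean lists it is _hist itself
  calcALoop n mod _hist 1 n.toNat

-- ===== PORT B =====
-- 'weight = {}; for j, x in _hist: weight[j] = weight.get(j, 0) + x'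
def calcBWeight (hist : List (Int × Int)) : PySem.Dict Int Int :=
  hist.foldl (fun d q => d.insert q.1 (d.getD q.1 0 + q.2)) PySem.Dict.empty

-- 'sm = 0; for j, w in weight.items(): sm += w * pow(j, c, mod) % mod'
def calcBSum (m c : Int) (d : PySem.Dict Int Int) : Int :=
  d.items.foldl (fun sm q => sm + PySem.Int.mod (q.2 * PySem.Int.powMod q.1 c.toNat m) m) 0

-- 'for c in range(1, n+1): … if sm % mod: return c' / 'return n'
def calcBLoop (n m : Int) (d : PySem.Dict Int Int) (c : Int) : Nat → Int
  | 0 => n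
  | Nat.succ f =>
    if PySem.Int.mod (calcBSum m c d) m ≠ 0 then c else calcBLoop n m d (c + 1) f

def calc_py_alt (n : Int) (_hist : List (Int × Int)) (mod : Int) : Int :=
  calcBLoop n mod (calcBWeight _hist) 1 n.toNat

-- ===== PRECONDITION & SPEC =====
-- Pre_ excludes exactly the inputs where Python A raises ZeroDivisionError: mod == 0 with
-- at least one loop iteration (n ≥ 1); B raises there too.
def Pre_calc_py (n : Int) (_hist : List (Int × Int)) (mod : Int) : Prop := mod ≠ 0 ∨ n < 1
instance (n : Int) (_hist : List (Int × Int)) (mod : Int) : Decidable (Pre_calc_py n _hist mod) := by unfold Pre_calc_py; infer_instance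
def pvWitness_calc_py : Int × (List (Int × Int)) × Int := (3, [(2, 1), (3, 1)], 5)

def Spec_calc_py (n : Int) (_hist : List (Int × Int)) (mod : Int) (out : Int) : Prop := out = calc_py_alt n _hist mod
instance (n : Int) (_hist : List (Int × Int)) (mod : Int) (out : Int) : Decidable (Spec_calc_py n _hist mod out) := by unfold Spec_calc_py; infer_instance

-- ===== CLAIM (what is proved, stated in full; the proofs are below) =====
def Claim_equal_calc_py : Prop := ∀ (n : Int) (_hist : List (Int × Int)) (mod : Int), Dom_calc_py n _hist mod → Pre_calc_py n _hist mod → Spec_calc_py n _hist mod (calc_py n _hist mod)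

-- ===== LEMMAS AND PROOFS =====

-- fmod is a congruence for multiplication: reducing a factor first does not change the result
theorem fmod_mul_fmod_left (a b m : Int) :
    (Int.fmod a m * b).fmod m = (a * b).fmod m := by
  rw [Int.mul_fmod, Int.fmod_fmod, ← Int.mul_fmod]

theorem fmod_mul_fmod_right (a b m : Int) :
    (a * Int.fmod b m).fmod m = (a * b).fmod m := by
  rw [Int.mul_fmod, Int.fmod_fmod, ← Int.mul_fmod]

-- fmod of a sum of per-pair fmods is the fmod of the plain sum
theorem fmod_sum_pairs (m : Int) (e : Nat) (L : List (Int × Int)) :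
    ((L.map (fun p : Int × Int => (p.2 * p.1 ^ e).fmod m)).sum).fmod m
      = ((L.map (fun p : Int × Int => p.2 * p.1 ^ e)).sum).fmod m := by
  induction L with
  | nil => rfl
  | cons a t ih =>
    simp only [List.map_cons, List.sum_cons]
    rw [Int.add_fmod, Int.fmod_fmod, ih, ← Int.add_fmod]

-- A's histogram after k+1 inner passes: entry (j, x) carries x * j^(k+1) reduced mod m
def pHist (m : Int) (k : Nat) (h : List (Int × Int)) : List (Int × Int) :=
  h.map (fun p => (p.1, PySem.Int.mod (p.2 * p.1 ^ (k + 1)) m))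

-- the sum A forms during its (k+1)-th inner pass
def pSum (m : Int) (k : Nat) (h : List (Int × Int)) : Int :=
  (h.map (fun p => PySem.Int.mod (p.2 * p.1 ^ (k + 1)) m)).sum

-- A's histogram state before the (k+1)-th inner pass
def stA (m : Int) (h : List (Int × Int)) : Nat → List (Int × Int)
  | 0 => h
  | Nat.succ k => pHist m k h

theorem calcAStep_shape (m : Int) (L : List (Int × Int)) (acc : List (Int × Int) × Int) :
    L.foldl (fun acc p =>
        let x := PySem.Int.mod (p.2 * p.1) m
        (acc.1 ++ [(p.1, x)], acc.2 + x)) acc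
      = (acc.1 ++ L.map (fun p => (p.1, PySem.Int.mod (p.2 * p.1) m)),
         acc.2 + (L.map (fun p => PySem.Int.mod (p.2 * p.1) m)).sum) := by
  induction L generalizing acc with
  | nil => simp
  | cons q t ih => simp [List.foldl_cons, ih]; ring

theorem calcAStep_stA (m : Int) (h : List (Int × Int)) (k : Nat) :
    calcAStep m (stA m h k) = (stA m h (k + 1), pSum m k h) := by
  cases k with
  | zero =>
    simp [calcAStep, stA, pHist, pSum, calcAStep_shape m h ([], 0)]
  | succ k =>
    simp only [calcAStep, stA, pHist, pSum, calcAStep_shape, List.map_map,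
      List.nil_append, zero_add, Prod.mk.injEq]
    refine ⟨?_, ?_⟩
    · apply List.map_congr_left
      intro p _
      simp only [Function.comp_apply, PySem.Int.mod]
      rw [fmod_mul_fmod_left]
      ring_nf
    · congr 1
      apply List.map_congr_left
      intro p _
      simp only [Function.comp_apply, PySem.Int.mod]
      rw [fmod_mul_fmod_left]
      ring_nf

-- weighted sum of a pair list under f applied to the key
def wS (f : Int → Int) (L : List (Int × Int)) : Int :=
  (L.map (fun p => p.2 * f p.1)).sum

theorem map_noKey (j w : Int) (T : List (Int × Int)) (hT : ∀ q ∈ T, q.1 ≠ j) :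
    T.map (fun p => if p.1 == j then (j, w) else p) = T := by
  conv_rhs => rw [← List.map_id T]
  apply List.map_congr_left
  intro q hq
  simp [hT q hq]

-- replacing the unique entry with key j by (j, w) shifts the weighted sum by (w - v) * f j
theorem wS_replace (f : Int → Int) (j w : Int) :
    ∀ (L : List (Int × Int)) (v : Int), (L.map (fun q => q.1)).Nodup → (j, v) ∈ L →
      wS f (L.map (fun p => if p.1 == j then (j, w) else p)) = wS f L - v * f j + w * f j := by
  intro L
  induction L with
  | nil => intro v _ hm; simp at hm
  | cons p T ih =>
    intro v hnd hmem
    simp only [List.map_cons, List.nodup_cons] at hnd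
    by_cases hpj : p.1 = j
    · have hp : p = (j, v) := by
        rcases (List.mem_cons.mp hmem) with h | h
        · exact h.symm
        · exfalso
          exact hnd.1 (by simpa [hpj] using List.mem_map_of_mem (f := fun q => q.1) h)
      have hT : ∀ q ∈ T, q.1 ≠ j := by
        intro q hq hqj
        exact hnd.1 (by simpa [hpj, hqj] using List.mem_map_of_mem (f := fun q => q.1) hq)
      subst hp
      simp only [List.map_cons]
      rw [map_noKey j w T hT]
      simp [wS]
      ring
    · have hmem' : (j, v) ∈ T := by
        rcases List.mem_cons.mp hmem with h | h
        · exact absurd (congrArg Prod.fst h.symm) hpj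
        · exact h
      have hif : (if (p.1 == j) = true then (j, w) else p) = p := if_neg (by simpa using hpj)
      have := ih v hnd.2 hmem'
      simp only [wS, List.map_cons, List.sum_cons, hif] at this ⊢
      rw [this]
      ring

-- inserting key j with its looked-up value plus x adds exactly x * f j to the weighted sum
theorem wS_insert (f : Int → Int) (d : PySem.Dict Int Int) (hnd : d.keys.Nodup) (j x : Int) :
    wS f ((d.insert j (d.getD j 0 + x)).items) = wS f d.items + x * f j := by
  by_cases hc : d.contains j = true
  · have hsome : (d.get? j).isSome := by rw [← PySem.Dict.contains_eq_isSome_get?]; exact hc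
    obtain ⟨v, hv⟩ := Option.isSome_iff_exists.mp hsome
    have hmem : (j, v) ∈ d.items := PySem.Dict.mem_items_of_get?_eq_some d hv
    have hgd : d.getD j 0 = v := PySem.Dict.getD_of_get?_eq_some d 0 hv
    have hndi : (d.items.map (fun q => q.1)).Nodup := by
      simpa [PySem.Dict.keys] using hnd
    rw [PySem.Dict.items_insert_of_contains d _ hc,
      wS_replace f j (d.getD j 0 + x) d.items v hndi hmem, hgd]
    ring
  · have hcf : d.contains j = false := by simpa using hc
    rw [PySem.Dict.items_insert_of_not_contains d _ hcf,
      PySem.Dict.getD_of_not_contains d 0 hcf]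
    simp only [wS, List.map_append, List.sum_append, List.map_cons, List.map_nil,
      List.sum_cons, List.sum_nil]
    ring

-- the aggregation fold: the weighted sum over the dict grows by the weighted sum of the list
theorem wS_fold (f : Int → Int) (h : List (Int × Int)) :
    ∀ (d : PySem.Dict Int Int), d.keys.Nodup →
      wS f ((h.foldl (fun d q => d.insert q.1 (d.getD q.1 0 + q.2)) d).items)
        = wS f d.items + wS f h := by
  induction h with
  | nil => intro d _; simp [wS]
  | cons q t ih =>
    intro d hnd
    rw [List.foldl_cons, ih _ (PySem.Dict.nodup_keys_insert d _ _ hnd),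
      wS_insert f d hnd q.1 q.2]
    simp only [wS, List.map_cons, List.sum_cons]
    ring

-- duplicate-base aggregation preserves the weighted sum exactly
theorem wS_weight (f : Int → Int) (h : List (Int × Int)) :
    wS f (calcBWeight h).items = wS f h := by
  have hfold := wS_fold f h PySem.Dict.empty PySem.Dict.nodup_keys_empty
  have h0 : wS f (PySem.Dict.empty (κ := Int) (ν := Int)).items = 0 := rfl
  rw [calcBWeight, hfold, h0, zero_add]

-- … specialised to the power function (in beta-reduced form, for rewriting)
theorem weight_sum_pow (e : Nat) (h : List (Int × Int)) :
    ((calcBWeight h).items.map (fun p => p.2 * p.1 ^ e)).sum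
      = (h.map (fun p => p.2 * p.1 ^ e)).sum := by
  simpa [wS] using wS_weight (fun j => j ^ e) h

-- per outer iteration the two tested quantities agree mod m
theorem test_eq (m : Int) (h : List (Int × Int)) (k : Nat) :
    PySem.Int.mod (pSum m k h) m = PySem.Int.mod (calcBSum m ((k : Int) + 1) (calcBWeight h)) m := by
  have hc : (((k : Int)) + 1).toNat = k + 1 := by omega
  have hB : calcBSum m ((k : Int) + 1) (calcBWeight h)
      = ((calcBWeight h).items.map (fun q => (q.2 * q.1 ^ (k + 1)).fmod m)).sum := by
    rw [calcBSum, hc, PySem.List.foldl_add, zero_add]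
    congr 1
    apply List.map_congr_left
    intro q _
    simp only [PySem.Int.mod, PySem.Int.powMod]
    rw [fmod_mul_fmod_right]
  rw [hB]
  simp only [pSum, PySem.Int.mod]
  rw [fmod_sum_pairs m (k + 1) h, fmod_sum_pairs m (k + 1) (calcBWeight h).items,
    weight_sum_pow (k + 1) h]

-- the two fueled outer loops agree step by step
theorem loop_eq (n m : Int) (h : List (Int × Int)) :
    ∀ (f k : Nat), calcALoop n m (stA m h k) ((k : Int) + 1) f
      = calcBLoop n m (calcBWeight h) ((k : Int) + 1) f := by
  intro f
  induction f with
  | zero => intro k; rfl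
  | succ f ih =>
    intro k
    rw [calcALoop, calcBLoop, calcAStep_stA, ← test_eq m h k]
    by_cases hz : PySem.Int.mod (pSum m k h) m = 0
    · simp only [hz, ne_eq, not_true_eq_false, if_false]
      have e : ((k : Int) + 1) + 1 = ((k + 1 : Nat) : Int) + 1 := by push_cast; ring
      rw [e]
      exact ih (k + 1)
    · simp [hz]

-- ===== VERDICT (by name: the statement is the Claim_ definition above) =====
theorem calc_py_spec : Claim_equal_calc_py := by
  intro n h m _ _
  unfold Spec_calc_py calc_py calc_py_alt
  have := loop_eq n m h n.toNat 0
  simpa using this
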